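-- pv_equiv track=rewrite | github.com/xiaocainiaogithub/algorithm010 | Week08/hammingWeiht3.py | hammingWeiht3
-- ===== SOURCE A (Python) =====
-- def hammingWeiht3(n:int)->int:
-- 	count = 0
-- 	while n:
-- 		res = n % 2
-- 		if res == 1:
-- 			count += 1
-- 		n //= 2
-- 	return count
-- ===== SOURCE B (Python) =====
-- def hammingWeiht3(n: int) -> int:
--     if n == 0:
--         return 0
--     return 1 + hammingWeiht3(n & (n - 1))
-- ===== Notes on version B (the rewrite author's own statement) =====
-- stated objective: alternative
-- what changed: Replaces A's iterative per-bit divide/modulo loop with a recursive Brian Kernighan formulation (n & (n-1) clears the lowest set bit), recursing once per set bit instead of looping once per bit position.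
import Mathlib
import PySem

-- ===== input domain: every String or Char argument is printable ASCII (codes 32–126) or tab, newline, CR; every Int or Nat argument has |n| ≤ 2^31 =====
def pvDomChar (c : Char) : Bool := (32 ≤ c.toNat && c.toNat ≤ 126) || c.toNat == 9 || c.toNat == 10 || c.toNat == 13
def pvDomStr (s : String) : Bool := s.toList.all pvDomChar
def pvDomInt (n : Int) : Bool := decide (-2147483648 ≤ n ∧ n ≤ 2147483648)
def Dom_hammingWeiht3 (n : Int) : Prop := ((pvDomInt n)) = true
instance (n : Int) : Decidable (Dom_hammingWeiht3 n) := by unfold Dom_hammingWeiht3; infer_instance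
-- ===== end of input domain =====

-- B replaces A's iterative per-bit divide/modulo loop with a recursive Kernighan
-- formulation (n & (n-1) clears the lowest set bit), one recursive call per set bit.

-- ===== PORT A =====
-- A's while loop: fuel n.natAbs + 1 suffices for every n ≥ 0 (the loop halves n each step);
-- for n < 0 Python diverges, which Pre_ excludes.
def pvLoopA : Nat → Int → Int → Int
  | 0, _, count => count
  | fuel + 1, n, count =>
    if n ≠ 0 then
      -- res = n % 2; if res == 1: count += 1; n //= 2
      pvLoopA fuel (PySem.Int.floordiv n 2)
        (if PySem.Int.mod n 2 = 1 then count + 1 else count)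
    else count

def hammingWeiht3 (n : Int) : Int := pvLoopA (n.natAbs + 1) n 0

-- ===== PORT B =====
-- termination fact cited by the recursion: clearing the lowest set bit shrinks a positive n
theorem pvLandPredLt (n : Int) (h : 0 < n) : (Int.land n (n - 1)).toNat < n.toNat := by
  obtain ⟨m, rfl⟩ := Int.eq_ofNat_of_zero_le (le_of_lt h)
  have hm : 0 < m := by exact_mod_cast h
  have hsub : (m : Int) - 1 = ((m - 1 : Nat) : Int) := by omega
  rw [hsub]
  have hland : Int.land (m : Int) ((m - 1 : Nat) : Int) = ((m &&& (m - 1) : Nat) : Int) := rfl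
  rw [hland, Int.toNat_natCast, Int.toNat_natCast]
  have := Nat.and_le_right (n := m) (m := m - 1)
  omega

-- B's recursion; the `n ≤ 0` guard only makes the definition total: Python returns 0
-- exactly at n = 0 and recurses forever for n < 0, which Pre_ excludes.
def hammingWeiht3_alt (n : Int) : Int :=
  if h : n ≤ 0 then 0
  else 1 + hammingWeiht3_alt (Int.land n (n - 1))
termination_by n.toNat
decreasing_by exact pvLandPredLt n (by omega)

-- ===== PRECONDITION & SPEC =====
-- Pre_ excludes negative n, on which Python A's loop never terminates (n //= 2 sticks at -1).
def Pre_hammingWeiht3 (n : Int) : Prop := 0 ≤ n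
instance (n : Int) : Decidable (Pre_hammingWeiht3 n) := by unfold Pre_hammingWeiht3; infer_instance
def pvWitness_hammingWeiht3 : Int := (11)

def Spec_hammingWeiht3 (n : Int) (out : Int) : Prop := out = hammingWeiht3_alt n
instance (n : Int) (out : Int) : Decidable (Spec_hammingWeiht3 n out) := by unfold Spec_hammingWeiht3; infer_instance

-- ===== CLAIM (what is proved, stated in full; the proofs are below) =====
def Claim_equal_hammingWeiht3 : Prop := ∀ (n : Int), Dom_hammingWeiht3 n → Pre_hammingWeiht3 n → Spec_hammingWeiht3 n (hammingWeiht3 n)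

-- ===== LEMMAS AND PROOFS =====

-- the common specification: number of 1 bits of a natural number
def pvCnt (m : Nat) : Nat :=
  if m = 0 then 0 else pvCnt (m / 2) + m % 2
decreasing_by exact Nat.div_lt_self (Nat.pos_of_ne_zero (by assumption)) (by omega)

theorem pvCnt_zero : pvCnt 0 = 0 := by simp [pvCnt]

theorem pvCnt_step (m : Nat) (h : m ≠ 0) : pvCnt m = pvCnt (m / 2) + m % 2 := by
  rw [pvCnt]; simp [h]

theorem pvCnt_two_mul (k : Nat) (h : 0 < k) : pvCnt (2 * k) = pvCnt k := by
  rw [pvCnt_step (2 * k) (by omega)]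
  have h1 : 2 * k / 2 = k := by omega
  have h2 : 2 * k % 2 = 0 := by omega
  rw [h1, h2]; omega

theorem pvCnt_two_mul_add_one (k : Nat) : pvCnt (2 * k + 1) = pvCnt k + 1 := by
  rw [pvCnt_step (2 * k + 1) (by omega)]
  have h1 : (2 * k + 1) / 2 = k := by omega
  have h2 : (2 * k + 1) % 2 = 1 := by omega
  rw [h1, h2]

theorem land_odd (k : Nat) : (2 * k + 1) &&& (2 * k) = 2 * k := by
  apply Nat.eq_of_testBit_eq; intro i
  cases i with
  | zero => simp [Nat.testBit_zero, Nat.mul_mod_right]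
  | succ j =>
    rw [Nat.testBit_land, Nat.testBit_succ, Nat.testBit_succ]
    have h1 : (2 * k + 1) / 2 = k := by omega
    have h2 : (2 * k) / 2 = k := by omega
    rw [h1, h2]; simp

theorem land_even (k : Nat) (h : 0 < k) : (2 * k) &&& (2 * k - 1) = 2 * (k &&& (k - 1)) := by
  apply Nat.eq_of_testBit_eq; intro i
  cases i with
  | zero => simp [Nat.testBit_zero, Nat.mul_mod_right]
  | succ j =>
    rw [Nat.testBit_land, Nat.testBit_succ, Nat.testBit_succ, Nat.testBit_succ]
    have h1 : (2 * k) / 2 = k := by omega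
    have h2 : (2 * k - 1) / 2 = k - 1 := by omega
    have h3 : (2 * (k &&& (k - 1))) / 2 = k &&& (k - 1) := by omega
    rw [h1, h2, h3, Nat.testBit_land]

-- Kernighan's step clears exactly one set bit
theorem cnt_land_pred (m : Nat) (h : 0 < m) : pvCnt (m &&& (m - 1)) + 1 = pvCnt m := by
  induction m using Nat.strong_induction_on with
  | _ m ih =>
    rcases Nat.even_or_odd m with ⟨k, hk⟩ | ⟨k, hk⟩
    · have hk2 : m = 2 * k := by omega
      have hkpos : 0 < k := by omega
      subst hk2
      rw [land_even k hkpos, pvCnt_two_mul k hkpos]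
      by_cases hk1 : k = 1
      · subst hk1; simp [pvCnt]
      · have hpos : 0 < k &&& (k - 1) ∨ k &&& (k - 1) = 0 := by omega
        have step := ih k (by omega) hkpos
        rcases hpos with hp | hp
        · rw [pvCnt_two_mul _ hp]; exact step
        · rw [hp] at step ⊢
          rw [Nat.mul_zero]; exact step
    · subst hk
      have : 2 * k + 1 - 1 = 2 * k := by omega
      rw [this, land_odd, pvCnt_two_mul_add_one]
      by_cases hk0 : k = 0
      · subst hk0; simp [pvCnt]
      · rw [pvCnt_two_mul k (Nat.pos_of_ne_zero hk0)]

-- cast bridges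
theorem floordiv_cast (a : Nat) : PySem.Int.floordiv (a : Int) 2 = ((a / 2 : Nat) : Int) := by
  simp [PySem.Int.floordiv, Int.fdiv_eq_ediv]

theorem mod_cast' (a : Nat) : PySem.Int.mod (a : Int) 2 = ((a % 2 : Nat) : Int) := by
  simp [PySem.Int.mod, Int.fmod_eq_emod]

-- loop A computes pvCnt (with enough fuel)
theorem loopA_eq (fuel : Nat) : ∀ (m : Nat) (c : Int), m < 2 ^ fuel →
    pvLoopA fuel (m : Int) c = c + (pvCnt m : Int) := by
  induction fuel with
  | zero =>
    intro m c h
    interval_cases m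
    simp [pvLoopA, pvCnt_zero]
  | succ f ih =>
    intro m c h
    by_cases hm : m = 0
    · subst hm; simp [pvLoopA, pvCnt_zero]
    · have hne : (m : Int) ≠ 0 := by exact_mod_cast hm
      rw [pvLoopA, if_pos hne, floordiv_cast, mod_cast',
        ih (m / 2) _ (by have := Nat.pow_lt_pow_succ (a := 2) (n := f) (by omega); omega),
        pvCnt_step m hm]
      by_cases hodd : m % 2 = 1
      · rw [if_pos (by exact_mod_cast hodd), hodd]; push_cast; ring
      · have h0 : m % 2 = 0 := by omega
        rw [if_neg (by rw [h0]; exact_mod_cast (by omega : (0 : Int) ≠ 1)), h0]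
        push_cast; ring

-- B's recursion computes pvCnt on naturals
theorem altB_eq (m : Nat) : hammingWeiht3_alt (m : Int) = (pvCnt m : Int) := by
  induction m using Nat.strong_induction_on with
  | _ m ih =>
    by_cases hm : m = 0
    · subst hm; rw [hammingWeiht3_alt]; simp [pvCnt_zero]
    · have hp : 0 < m := Nat.pos_of_ne_zero hm
      have hlt : ¬ ((m : Int) ≤ 0) := by exact_mod_cast Nat.not_le.mpr hp
      have hsub : (m : Int) - 1 = ((m - 1 : Nat) : Int) := by omega
      have hland : Int.land (m : Int) ((m - 1 : Nat) : Int) = ((m &&& (m - 1) : Nat) : Int) := rfl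
      rw [hammingWeiht3_alt, dif_neg hlt, hsub, hland,
        ih (m &&& (m - 1)) (by have := Nat.and_le_right (n := m) (m := m - 1); omega)]
      have := cnt_land_pred m hp
      omega

-- ===== VERDICT (by name: the statement is the Claim_ definition above) =====
theorem hammingWeiht3_spec : Claim_equal_hammingWeiht3 := by
  intro n _ hpre
  unfold Spec_hammingWeiht3 hammingWeiht3
  obtain ⟨m, rfl⟩ := Int.eq_ofNat_of_zero_le hpre
  simp only [Int.natAbs_natCast]
  rw [loopA_eq (m + 1) m 0 (by have := Nat.lt_two_pow_self (n := m); omega), altB_eq m]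
  ring
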